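-- pv_equiv track=rewrite | github.com/FlorentB974/graphrag | app_ui/stats.py | _order_operations
-- ===== SOURCE A (Python) =====
-- from typing import Any, Dict, List, Optional, Sequence, Tuple
--
-- _OPERATION_ORDER = [
--     "Embeddings",
--     "Upload Embeddings",
--     "Query Analysis",
--     "Multi-hop Retrieval",
--     "LLM Answer",
--     "Quality Score",
--     "Entity Extraction",
--     "LLM Merge",
--     "Model Introspection",
-- ]
--
-- def _order_operations(operations: Dict[str, Dict[str, Any]]) -> List[str]:
--     """Return operation labels in a friendly display order."""
--     ordered = []
--     remaining = set(operations.keys())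
--     for label in _OPERATION_ORDER:
--         if label in remaining:
--             ordered.append(label)
--             remaining.remove(label)
--     ordered.extend(sorted(remaining))
--     return ordered
-- ===== SOURCE B (Python) =====
-- _OPERATION_ORDER = [
--     "Embeddings",
--     "Upload Embeddings",
--     "Query Analysis",
--     "Multi-hop Retrieval",
--     "LLM Answer",
--     "Quality Score",
--     "Entity Extraction",
--     "LLM Merge",
--     "Model Introspection",
-- ]
--
--
-- def _order_operations(operations):
--     """Return operation labels in a friendly display order."""
--     rank = {label: i for i, label in enumerate(_OPERATION_ORDER)}
--     sentinel = len(_OPERATION_ORDER)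
--     return sorted(operations.keys(), key=lambda k: (rank.get(k, sentinel), k))
-- ===== Notes on version B (the rewrite author's own statement) =====
-- stated objective: simpler
-- what changed: Replaces the two-phase partition (explicit loop over the fixed order list with set membership/removal, then a separate sorted() of the leftovers) by one sorted() call over the keys with a composite key (rank-in-order-list with a sentinel for unknown labels, then the label itself).
import Mathlib
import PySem

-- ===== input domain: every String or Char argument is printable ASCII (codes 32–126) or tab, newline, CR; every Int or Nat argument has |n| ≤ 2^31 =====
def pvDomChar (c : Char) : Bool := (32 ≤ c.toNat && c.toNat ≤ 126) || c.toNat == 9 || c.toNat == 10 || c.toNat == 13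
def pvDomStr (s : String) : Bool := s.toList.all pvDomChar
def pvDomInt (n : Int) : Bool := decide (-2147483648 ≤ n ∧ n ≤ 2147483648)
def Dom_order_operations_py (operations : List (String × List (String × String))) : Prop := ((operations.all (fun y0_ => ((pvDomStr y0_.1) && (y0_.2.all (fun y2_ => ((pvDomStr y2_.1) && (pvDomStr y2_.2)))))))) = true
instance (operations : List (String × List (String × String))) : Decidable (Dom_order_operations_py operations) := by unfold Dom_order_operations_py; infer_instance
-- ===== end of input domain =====

-- B replaces A's two-phase "walk the fixed order list, then sort the leftover set" by a single
-- keyed sort (rank in the order list, sentinel for unknown labels, then the label); same result, simpler.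

-- the module constant _OPERATION_ORDER (shared context of both versions)
def pvOrder : List String :=
  ["Embeddings", "Upload Embeddings", "Query Analysis", "Multi-hop Retrieval", "LLM Answer",
   "Quality Score", "Entity Extraction", "LLM Merge", "Model Introspection"]

-- ===== PORT A =====
def order_operations_py (operations : List (String × List (String × String))) : List String :=
  -- ordered = []; remaining = set(operations.keys())
  let remaining0 : PySem.Set String := PySem.Set.ofList (PySem.Dict.ofList operations).keys
  -- for label in _OPERATION_ORDER: if label in remaining: ordered.append(label); remaining.remove(label)
  let st := pvOrder.foldl
    (fun (p : List String × PySem.Set String) label =>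
      if p.2.contains label then
        (p.1 ++ [label], (PySem.Set.remove? p.2 label).getD p.2)
      else p)
    ([], remaining0)
  -- ordered.extend(sorted(remaining)); return ordered
  st.1 ++ PySem.List.sorted st.2 (fun x => x)

-- ===== PORT B =====
def order_operations_py_alt (operations : List (String × List (String × String))) : List String :=
  -- rank = {label: i for i, label in enumerate(_OPERATION_ORDER)}
  let rank : PySem.Dict String Int :=
    (PySem.List.enumerate pvOrder).foldl (fun d p => d.insert p.2 p.1) PySem.Dict.empty
  -- sentinel = len(_OPERATION_ORDER)
  let sentinel : Int := (pvOrder.length : Int)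
  -- sorted(operations.keys(), key=lambda k: (rank.get(k, sentinel), k))
  PySem.List.sorted2 (PySem.Dict.ofList operations).keys
    (fun k => rank.getD k sentinel) (fun k => k)

-- ===== PRECONDITION & SPEC =====
def Spec_order_operations_py (operations : List (String × List (String × String))) (out : List String) : Prop := out = order_operations_py_alt operations
instance (operations : List (String × List (String × String))) (out : List String) : Decidable (Spec_order_operations_py operations out) := by unfold Spec_order_operations_py; infer_instance

-- ===== CLAIM (what is proved, stated in full; the proofs are below) =====
def Claim_equal_order_operations_py : Prop := ∀ (operations : List (String × List (String × String))), Dom_order_operations_py operations → Spec_order_operations_py operations (order_operations_py operations)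

-- ===== LEMMAS AND PROOFS =====

-- B's rank lookup as a plain function (proof-side name for the composite key's first component)
def pvRankF (k : String) : Int :=
  (((PySem.List.enumerate pvOrder).foldl (fun d p => d.insert p.2 p.1) PySem.Dict.empty :
      PySem.Dict String Int)).getD k 9

-- sorted with a 2-tuple key is sorted with the lexicographic key
theorem sorted2_eq_sorted_lex {α κ₁ κ₂ : Type} [LinearOrder κ₁] [LinearOrder κ₂]
    (xs : List α) (k1 : α → κ₁) (k2 : α → κ₂) :
    PySem.List.sorted2 xs k1 k2 = PySem.List.sorted xs (fun x => toLex (k1 x, k2 x)) := by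
  rw [PySem.List.sorted_eq_foldl_insertBy]
  show List.foldl (fun acc x => PySem.List.insertBy
      (fun a b => decide (k1 a < k1 b) || (!decide (k1 b < k1 a) && decide (k2 a < k2 b))) x acc) [] xs = _
  have hb : (fun (a b : α) => decide (k1 a < k1 b) || (!decide (k1 b < k1 a) && decide (k2 a < k2 b)))
      = fun a b => decide ((fun x => toLex (k1 x, k2 x)) a < (fun x => toLex (k1 x, k2 x)) b) := by
    funext a b
    rcases lt_trichotomy (k1 a) (k1 b) with h | h | h <;>
      simp [Prod.Lex.toLex_lt_toLex, h, lt_asymm]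
  rw [hb]

-- A's loop over the fixed order list, characterised as two filters
theorem loopA (L : List String) (hL : L.Nodup) (acc r : List String) :
    L.foldl
      (fun (p : List String × PySem.Set String) label =>
        if p.2.contains label then
          (p.1 ++ [label], (PySem.Set.remove? p.2 label).getD p.2)
        else p)
      (acc, r)
    = (acc ++ L.filter (fun l => r.contains l), r.filter (fun x => !L.contains x)) := by
  induction L generalizing acc r with
  | nil => simp
  | cons l t ih =>
    rcases List.nodup_cons.mp hL with ⟨hl, ht⟩
    rw [List.foldl_cons]
    dsimp only
    by_cases h : r.contains l
    · have hm : l ∈ r := List.mem_of_elem_eq_true h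
      have hstep : (if PySem.Set.contains r l = true then
          (acc ++ [l], (PySem.Set.remove? r l).getD r) else (acc, r))
          = (acc ++ [l], r.filter (fun y => !y == l)) := by
        simp [hm, PySem.Set.contains, PySem.Set.remove?, PySem.Set.discard]
      rw [hstep, ih ht]
      have h1 : t.filter (fun x => (r.filter (fun y => !y == l)).contains x)
          = t.filter (fun x => r.contains x) := by
        apply List.filter_congr
        intro x hx
        have hxl : x ≠ l := fun he => hl (he ▸ hx)
        rw [Bool.eq_iff_iff]
        simp [List.mem_filter, hxl]
      have h2 : (r.filter (fun y => !y == l)).filter (fun x => !t.contains x)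
          = r.filter (fun x => !(l :: t).contains x) := by
        rw [List.filter_filter]
        apply List.filter_congr
        intro x hx
        by_cases hxe : x = l <;> simp [hxe]
      rw [h1, h2]
      simp [hm]
    · have hlr : l ∉ r := fun hm => h (List.elem_eq_true_of_mem hm)
      have hstep : (if PySem.Set.contains r l = true then
          (acc ++ [l], (PySem.Set.remove? r l).getD r) else (acc, r)) = (acc, r) := by
        simp [PySem.Set.contains, hlr]
      rw [hstep, ih ht]
      have h1 : (l :: t).filter (fun x => r.contains x) = t.filter (fun x => r.contains x) := by
        simp [hlr]
      have h2 : r.filter (fun x => !t.contains x) = r.filter (fun x => !(l :: t).contains x) := by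
        apply List.filter_congr
        intro x hx
        have hxl : ¬ x = l := fun he => hlr (he ▸ hx)
        simp [hxl]
      rw [h1, h2]

theorem rankF_of_not_mem (k : String) (hk : k ∉ pvOrder) : pvRankF k = 9 := by
  simp only [pvOrder, List.mem_cons, not_or] at hk
  obtain ⟨h1, h2, h3, h4, h5, h6, h7, h8, h9, -⟩ := hk
  show (PySem.Dict.mk [("Embeddings", (0:Int)), ("Upload Embeddings", 1), ("Query Analysis", 2),
      ("Multi-hop Retrieval", 3), ("LLM Answer", 4), ("Quality Score", 5), ("Entity Extraction", 6),
      ("LLM Merge", 7), ("Model Introspection", 8)]).getD k 9 = 9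
  simp [PySem.Dict.getD, Ne.symm h1, Ne.symm h2, Ne.symm h3,
    Ne.symm h4, Ne.symm h5, Ne.symm h6, Ne.symm h7, Ne.symm h8, Ne.symm h9, PySem.Dict.get?]

theorem main_eq (ops : List (String × List (String × String))) :
    order_operations_py ops = order_operations_py_alt ops := by
  have hnd : (PySem.Dict.ofList ops).keys.Nodup := PySem.Dict.nodup_keys_ofList ops
  set ks := (PySem.Dict.ofList ops).keys with hks
  set R := ks.filter (fun x => !pvOrder.contains x) with hR
  have hB : order_operations_py_alt ops
      = PySem.List.sorted ks (fun k => toLex ((pvRankF k, k) : Int × String)) := by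
    unfold order_operations_py_alt
    rw [sorted2_eq_sorted_lex]
    rfl
  have hA : order_operations_py ops
      = pvOrder.filter (fun l => ks.contains l)
        ++ PySem.List.sorted R (fun x => x) := by
    unfold order_operations_py
    show (pvOrder.foldl _ ([], PySem.Set.ofList ks)).1
        ++ PySem.List.sorted (pvOrder.foldl _ ([], PySem.Set.ofList ks)).2 (fun x => x) = _
    rw [PySem.Set.ofList_eq_self_of_nodup ks hnd, loopA pvOrder (by decide) [] ks]
    simp [hR]
  rw [hA, hB]
  have hRnd : R.Nodup := hnd.filter _
  have hOnd : pvOrder.Nodup := by decide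
  have hperm : (pvOrder.filter (fun l => ks.contains l) ++ PySem.List.sorted R (fun x => x)).Perm ks := by
    have hp2 : (PySem.List.sorted R (fun x => x)).Perm R := PySem.List.sorted_perm R _ _
    refine ((hp2.append_left (pvOrder.filter (fun l => ks.contains l))).trans ?_)
    have hFnd : (pvOrder.filter (fun l => ks.contains l)).Nodup := hOnd.filter _
    have happnd : (pvOrder.filter (fun l => ks.contains l) ++ R).Nodup := by
      rw [List.nodup_append]
      refine ⟨hFnd, hRnd, ?_⟩
      intro a haF b hbR
      rw [hR] at hbR
      simp only [List.mem_filter] at haF hbR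
      simp at haF hbR
      exact fun he => hbR.2 (he ▸ haF.1)
    rw [List.perm_ext_iff_of_nodup happnd hnd]
    intro x
    simp only [List.mem_append, List.mem_filter, hR]
    simp
    constructor
    · rintro (⟨-, h⟩ | ⟨h, -⟩) <;> exact h
    · intro h
      by_cases ho : x ∈ pvOrder
      · exact Or.inl ⟨ho, h⟩
      · exact Or.inr ⟨h, ho⟩
  have hpair : (pvOrder.filter (fun l => ks.contains l) ++ PySem.List.sorted R (fun x => x)).Pairwise
      (fun a b => (fun k => toLex ((pvRankF k, k) : Int × String)) a < (fun k => toLex ((pvRankF k, k) : Int × String)) b) := by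
    have hS_not_mem : ∀ x ∈ PySem.List.sorted R (fun x => x), x ∉ pvOrder := by
      intro x hx
      have := (PySem.List.mem_sorted R (fun x => x) false x).mp hx
      rw [hR] at this
      simp only [List.mem_filter] at this
      simpa using this.2
    rw [List.pairwise_append]
    refine ⟨?_, ?_, ?_⟩
    · have h0 : pvOrder.Pairwise (fun a b => pvRankF a < pvRankF b) := by decide
      have h1 : (pvOrder.filter (fun l => ks.contains l)).Pairwise (fun a b => pvRankF a < pvRankF b) :=
        List.Pairwise.sublist (List.filter_sublist) h0
      exact h1.imp (fun h => (Prod.Lex.toLex_lt_toLex).mpr (Or.inl h))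
    · have hle : (PySem.List.sorted R (fun x => x)).Pairwise (fun a b => a ≤ b) :=
        PySem.List.sorted_pairwise R (fun x => x)
      have hnd2 : (PySem.List.sorted R (fun x => x)).Nodup :=
        (PySem.List.sorted_perm R (fun x => x) false).symm.nodup hRnd
      have hcomb := hle.and hnd2
      refine hcomb.imp_of_mem ?_
      intro a b ha hb hab
      refine (Prod.Lex.toLex_lt_toLex).mpr (Or.inr ?_)
      rw [rankF_of_not_mem a (hS_not_mem a ha), rankF_of_not_mem b (hS_not_mem b hb)]
      exact ⟨rfl, lt_of_le_of_ne hab.1 hab.2⟩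
    · intro a ha b hb
      have ha' : a ∈ pvOrder := (List.mem_filter.mp ha).1
      have h9 : ∀ x ∈ pvOrder, pvRankF x < 9 := by decide
      refine (Prod.Lex.toLex_lt_toLex).mpr (Or.inl ?_)
      rw [rankF_of_not_mem b (hS_not_mem b hb)]
      exact h9 a ha'
  exact (PySem.List.sorted_eq_of_perm_of_pairwise_lt ks _ _ hperm hpair).symm

-- ===== VERDICT (by name: the statement is the Claim_ definition above) =====
theorem order_operations_py_spec : Claim_equal_order_operations_py := by
  intro ops _
  exact main_eq ops
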